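-- pv_equiv track=rewrite | github.com/rehan-shafi/exam_scheduler_streamlit | app/scheduler.py | _swap_would_be_valid
-- ===== SOURCE A (Python) =====
-- def _build_slot_day_maps(day_slots):
--     """
--     day_slots: list of even slot ids in the exact day order being used (e.g., [0,10,2,12,...])
--     Returns:
--       slot_to_day: dict[slot] -> day_index
--       day_to_slot: dict[day_index] -> slot
--     """
--     slot_to_day = {s: d for d, s in enumerate(day_slots)}
--     day_to_slot = {d: s for d, s in enumerate(day_slots)}
--     return slot_to_day, day_to_slot
--
-- def _triples_from_slots_order_aware(slots_set, slot_to_day, num_days):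
--     """
--     Convert a set of slots -> day indices using slot_to_day, then return all (d,d+1,d+2) windows present.
--     """
--     day_idxs = sorted({slot_to_day[s] for s in slots_set if s in slot_to_day})
--     dayset = set(day_idxs)
--     triples = []
--     for d in range(num_days - 2):
--         if d in dayset and (d+1) in dayset and (d+2) in dayset:
--             triples.append((d, d+1, d+2))
--     return triples
--
-- def _swap_would_be_valid(courseA, slotA, courseB, slotB, course_slot_map, conflict_map,
--                          course_to_students, student_slots, day_slots):
--     slot_to_day, _ = _build_slot_day_maps(day_slots)
--     num_days = len(day_slots)
--
--     neighA = conflict_map.get(courseA, set())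
--     neighB = conflict_map.get(courseB, set())
--
--     for n in neighA:
--         if n in course_slot_map and course_slot_map[n] == slotB:
--             return False
--     for n in neighB:
--         if n in course_slot_map and course_slot_map[n] == slotA:
--             return False
--
--     for stu in course_to_students.get(courseA, set()):
--         sset = set(student_slots.get(stu, set()))
--         if slotA in sset:
--             sset.remove(slotA)
--         sset.add(slotB)
--         if len(_triples_from_slots_order_aware(sset, slot_to_day, num_days)) > 0:
--             return False
--
--     for stu in course_to_students.get(courseB, set()):
--         sset = set(student_slots.get(stu, set()))
--         if slotB in sset:
--             sset.remove(slotB)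
--         sset.add(slotA)
--         if len(_triples_from_slots_order_aware(sset, slot_to_day, num_days)) > 0:
--             return False
--
--     return True
-- ===== SOURCE B (Python) =====
-- def _swap_would_be_valid(courseA, slotA, courseB, slotB, course_slot_map, conflict_map,
--                          course_to_students, student_slots, day_slots):
--     slot_to_day = {s: d for d, s in enumerate(day_slots)}
--
--     def clashes(neigh, slot):
--         return any(n in course_slot_map and course_slot_map[n] == slot for n in neigh)
--
--     if clashes(conflict_map.get(courseA, ()), slotB) or clashes(conflict_map.get(courseB, ()), slotA):
--         return False
--
--     def three_in_a_row(stu, removed, added):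
--         # fold the student's post-swap slots into a day bitmask; a set copy is
--         # unnecessary because OR is idempotent
--         mask = 0
--         for s in student_slots.get(stu, ()):
--             if s != removed and s in slot_to_day:
--                 mask |= 1 << slot_to_day[s]
--         if added in slot_to_day:
--             mask |= 1 << slot_to_day[added]
--         return mask & (mask >> 1) & (mask >> 2) != 0
--
--     return (not any(three_in_a_row(stu, slotA, slotB) for stu in course_to_students.get(courseA, ()))
--             and not any(three_in_a_row(stu, slotB, slotA) for stu in course_to_students.get(courseB, ())))
-- ===== Notes on version B (the rewrite author's own statement) =====
-- stated objective: alternative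
-- what changed: Triple-in-a-row detection per student is done by folding the post-swap slots into a day bitmask and testing mask & (mask>>1) & (mask>>2) != 0, instead of building a set copy, sorting the mapped day indices and scanning every window d..d+2 of range(num_days-2).
import Mathlib
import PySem

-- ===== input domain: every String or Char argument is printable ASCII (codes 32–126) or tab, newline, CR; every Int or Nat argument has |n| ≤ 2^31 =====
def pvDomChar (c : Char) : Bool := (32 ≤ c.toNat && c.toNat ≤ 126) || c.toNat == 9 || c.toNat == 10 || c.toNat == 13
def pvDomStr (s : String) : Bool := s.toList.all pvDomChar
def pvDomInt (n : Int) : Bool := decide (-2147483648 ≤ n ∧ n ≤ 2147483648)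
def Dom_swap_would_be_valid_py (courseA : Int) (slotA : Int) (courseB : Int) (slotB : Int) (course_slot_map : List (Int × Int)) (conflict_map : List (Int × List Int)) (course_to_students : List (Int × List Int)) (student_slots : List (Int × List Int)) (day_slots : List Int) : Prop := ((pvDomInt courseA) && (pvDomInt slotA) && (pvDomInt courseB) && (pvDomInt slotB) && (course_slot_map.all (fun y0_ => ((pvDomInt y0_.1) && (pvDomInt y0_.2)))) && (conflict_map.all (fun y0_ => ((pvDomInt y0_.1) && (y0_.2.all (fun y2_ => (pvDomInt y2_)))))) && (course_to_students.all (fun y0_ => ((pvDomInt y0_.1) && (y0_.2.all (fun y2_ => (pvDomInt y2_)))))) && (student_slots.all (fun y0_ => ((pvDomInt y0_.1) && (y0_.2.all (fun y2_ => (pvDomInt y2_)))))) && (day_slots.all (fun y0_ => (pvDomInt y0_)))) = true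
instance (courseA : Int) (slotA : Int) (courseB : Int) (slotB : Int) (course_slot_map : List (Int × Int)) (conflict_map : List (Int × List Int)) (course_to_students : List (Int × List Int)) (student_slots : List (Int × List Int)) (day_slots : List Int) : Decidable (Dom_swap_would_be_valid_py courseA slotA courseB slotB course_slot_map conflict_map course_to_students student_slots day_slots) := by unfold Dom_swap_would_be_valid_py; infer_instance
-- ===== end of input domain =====

-- B replaces A's per-student sorted-day-set-plus-window-scan triple detection by a day
-- bitmask folded over the post-swap slots and the test mask&(mask>>1)&(mask>>2) != 0
-- (objective: alternative). Both are pure; neither mutates its arguments.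

-- ===== PORT A =====
-- _build_slot_day_maps: ({s: d for d, s in enumerate(day_slots)}, {d: s for d, s in enumerate(day_slots)})
def pvBuildSlotDayMaps (day_slots : List Int) : PySem.Dict Int Int × PySem.Dict Int Int :=
  ((PySem.List.enumerate day_slots).foldl (fun d p => d.insert p.2 p.1) PySem.Dict.empty,
   (PySem.List.enumerate day_slots).foldl (fun d p => d.insert p.1 p.2) PySem.Dict.empty)

-- _triples_from_slots_order_aware
def pvTriples (slots_set : PySem.Set Int) (slot_to_day : PySem.Dict Int Int) (num_days : Int) :
    List (Int × Int × Int) :=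
  let day_idxs := PySem.List.sorted
    (PySem.Set.ofList (slots_set.filterMap (fun s => slot_to_day.get? s))) (fun x => x) false
  let dayset := PySem.Set.ofList day_idxs
  (PySem.List.pyRange 0 (num_days - 2) 1).foldl (fun acc d =>
    if dayset.contains d && dayset.contains (d + 1) && dayset.contains (d + 2) then
      acc ++ [(d, d + 1, d + 2)]
    else acc) []

def swap_would_be_valid_py (courseA : Int) (slotA : Int) (courseB : Int) (slotB : Int) (course_slot_map : List (Int × Int)) (conflict_map : List (Int × List Int)) (course_to_students : List (Int × List Int)) (student_slots : List (Int × List Int)) (day_slots : List Int) : Bool :=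
  let slot_to_day := (pvBuildSlotDayMaps day_slots).1
  let num_days : Int := day_slots.length
  let neighA := (PySem.Dict.mk conflict_map).getD courseA []
  let neighB := (PySem.Dict.mk conflict_map).getD courseB []
  -- 'for n in neighA: if n in course_slot_map and course_slot_map[n] == slotB: return False'
  if neighA.any (fun n => match (PySem.Dict.mk course_slot_map).get? n with
      | some v => decide (v = slotB)
      | none => false) then false
  else if neighB.any (fun n => match (PySem.Dict.mk course_slot_map).get? n with
      | some v => decide (v = slotA)
      | none => false) then false
  -- 'for stu in course_to_students.get(courseA, set()): …'
  else if ((PySem.Dict.mk course_to_students).getD courseA []).any (fun stu =>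
      let sset := PySem.Set.ofList ((PySem.Dict.mk student_slots).getD stu [])
      -- 'if slotA in sset: sset.remove(slotA)' (remove on a member = discard)
      let sset := if sset.contains slotA then PySem.Set.discard sset slotA else sset
      let sset := PySem.Set.add sset slotB
      decide ((pvTriples sset slot_to_day num_days).length > 0)) then false
  else if ((PySem.Dict.mk course_to_students).getD courseB []).any (fun stu =>
      let sset := PySem.Set.ofList ((PySem.Dict.mk student_slots).getD stu [])
      let sset := if sset.contains slotB then PySem.Set.discard sset slotB else sset
      let sset := PySem.Set.add sset slotA
      decide ((pvTriples sset slot_to_day num_days).length > 0)) then false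
  else true

-- ===== PORT B =====
-- slot_to_day = {s: d for d, s in enumerate(day_slots)}
def pvSlotDayMapAlt (day_slots : List Int) : PySem.Dict Int Int :=
  (PySem.List.enumerate day_slots).foldl (fun d p => d.insert p.2 p.1) PySem.Dict.empty

-- inner function three_in_a_row(stu, removed, added), given the student's slot list;
-- '1 << slot_to_day[s]': the stored day is an enumerate index, hence ≥ 0, so the Nat
-- shift by d.toNat is exactly Python's shift
def pvThreeInARow (slot_to_day : PySem.Dict Int Int) (slots : List Int) (removed added : Int) : Bool :=
  let mask : Nat := slots.foldl (fun m s =>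
    if s ≠ removed then
      match slot_to_day.get? s with
      | some d => m ||| (1 <<< d.toNat)
      | none => m
    else m) 0
  let mask : Nat := match slot_to_day.get? added with
    | some d => mask ||| (1 <<< d.toNat)
    | none => mask
  decide (mask &&& (mask >>> 1) &&& (mask >>> 2) ≠ 0)

-- clashes(neigh, slot)
def pvClashes (course_slot_map : List (Int × Int)) (neigh : List Int) (slot : Int) : Bool :=
  neigh.any (fun n => match (PySem.Dict.mk course_slot_map).get? n with
    | some v => decide (v = slot)
    | none => false)

def swap_would_be_valid_py_alt (courseA : Int) (slotA : Int) (courseB : Int) (slotB : Int) (course_slot_map : List (Int × Int)) (conflict_map : List (Int × List Int)) (course_to_students : List (Int × List Int)) (student_slots : List (Int × List Int)) (day_slots : List Int) : Bool :=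
  let slot_to_day := pvSlotDayMapAlt day_slots
  if pvClashes course_slot_map ((PySem.Dict.mk conflict_map).getD courseA []) slotB
      || pvClashes course_slot_map ((PySem.Dict.mk conflict_map).getD courseB []) slotA then
    false
  else
    !((PySem.Dict.mk course_to_students).getD courseA []).any (fun stu =>
        pvThreeInARow slot_to_day ((PySem.Dict.mk student_slots).getD stu []) slotA slotB)
    && !((PySem.Dict.mk course_to_students).getD courseB []).any (fun stu =>
        pvThreeInARow slot_to_day ((PySem.Dict.mk student_slots).getD stu []) slotB slotA)

-- ===== PRECONDITION & SPEC =====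
def Spec_swap_would_be_valid_py (courseA : Int) (slotA : Int) (courseB : Int) (slotB : Int) (course_slot_map : List (Int × Int)) (conflict_map : List (Int × List Int)) (course_to_students : List (Int × List Int)) (student_slots : List (Int × List Int)) (day_slots : List Int) (out : Bool) : Prop := out = swap_would_be_valid_py_alt courseA slotA courseB slotB course_slot_map conflict_map course_to_students student_slots day_slots
instance (courseA : Int) (slotA : Int) (courseB : Int) (slotB : Int) (course_slot_map : List (Int × Int)) (conflict_map : List (Int × List Int)) (course_to_students : List (Int × List Int)) (student_slots : List (Int × List Int)) (day_slots : List Int) (out : Bool) : Decidable (Spec_swap_would_be_valid_py courseA slotA courseB slotB course_slot_map conflict_map course_to_students student_slots day_slots out) := by unfold Spec_swap_would_be_valid_py; infer_instance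

-- ===== CLAIM (what is proved, stated in full; the proofs are below) =====
def Claim_equal_swap_would_be_valid_py : Prop := ∀ (courseA : Int) (slotA : Int) (courseB : Int) (slotB : Int) (course_slot_map : List (Int × Int)) (conflict_map : List (Int × List Int)) (course_to_students : List (Int × List Int)) (student_slots : List (Int × List Int)) (day_slots : List Int), Dom_swap_would_be_valid_py courseA slotA courseB slotB course_slot_map conflict_map course_to_students student_slots day_slots → Spec_swap_would_be_valid_py courseA slotA courseB slotB course_slot_map conflict_map course_to_students student_slots day_slots (swap_would_be_valid_py courseA slotA courseB slotB course_slot_map conflict_map course_to_students student_slots day_slots)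

-- ===== LEMMAS AND PROOFS =====

-- every value stored in the slot→day dict is an index of day_slots: 0 ≤ d < |day_slots|
theorem pvSlotDay_value_range (day_slots : List Int) (s d : Int)
    (h : (pvSlotDayMapAlt day_slots).get? s = some d) :
    0 ≤ d ∧ d < (day_slots.length : Int) := by
  have key : ∀ (l : List (Int × Int)) (d0 : PySem.Dict Int Int),
      (∀ k v, d0.get? k = some v → 0 ≤ v ∧ v < (day_slots.length : Int)) →
      (∀ p ∈ l, 0 ≤ p.1 ∧ p.1 < (day_slots.length : Int)) →
      ∀ k v, (l.foldl (fun d p => d.insert p.2 p.1) d0).get? k = some v →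
        0 ≤ v ∧ v < (day_slots.length : Int) := by
    intro l
    induction l with
    | nil => intro d0 h0 _ k v hk; exact h0 k v hk
    | cons p t ih =>
      intro d0 h0 hl k v hk
      refine ih (d0.insert p.2 p.1) ?_ (fun q hq => hl q (List.mem_cons_of_mem _ hq)) k v hk
      intro k' v' hk'
      by_cases hne : k' = p.2
      · subst hne
        rw [PySem.Dict.get?_insert_self] at hk'
        cases hk'
        exact hl p (List.mem_cons_self ..)
      · rw [PySem.Dict.get?_insert_of_ne d0 p.1 hne] at hk'
        exact h0 k' v' hk'
  refine key (PySem.List.enumerate day_slots) PySem.Dict.empty ?_ ?_ s d h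
  · intro k v hk; simp [PySem.Dict.get?_empty] at hk
  · intro p hp
    rw [PySem.List.mem_enumerate_iff] at hp
    obtain ⟨k, hk, rfl⟩ := hp
    simp
    omega

-- membership of a day in A's 'dayset' = some slot of the set maps to it
theorem pv_dayset_mem (sset : PySem.Set Int) (std : PySem.Dict Int Int) (d : Int) :
    (d ∈ PySem.Set.ofList (PySem.List.sorted
        (PySem.Set.ofList (sset.filterMap (fun s => std.get? s))) (fun x => x) false)) ↔
      ∃ s ∈ sset, std.get? s = some d := by
  rw [PySem.Set.mem_ofList, PySem.List.mem_sorted, PySem.Set.mem_ofList, List.mem_filterMap]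

-- A's per-student test, characterised: some three consecutive days are all hit
theorem pvTriples_pos_iff (sset : PySem.Set Int) (day_slots : List Int) :
    (pvTriples sset (pvSlotDayMapAlt day_slots) (day_slots.length)).length > 0 ↔
      ∃ d : Int, 0 ≤ d ∧
        (∃ s ∈ sset, (pvSlotDayMapAlt day_slots).get? s = some d) ∧
        (∃ s ∈ sset, (pvSlotDayMapAlt day_slots).get? s = some (d + 1)) ∧
        (∃ s ∈ sset, (pvSlotDayMapAlt day_slots).get? s = some (d + 2)) := by
  unfold pvTriples
  rw [PySem.List.foldl_append_if]
  simp only [List.nil_append, List.length_map, List.length_pos_iff, ne_eq]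
  rw [List.filter_eq_nil_iff]
  push Not
  have hc : ∀ (t : List Int) (d : Int), PySem.Set.contains t d = true ↔ d ∈ t := by
    intro t d; simp
  constructor
  · rintro ⟨d, hdmem, hd⟩
    rw [PySem.List.mem_pyRange_one] at hdmem
    simp only [Bool.and_eq_true, hc] at hd
    exact ⟨d, hdmem.1, (pv_dayset_mem _ _ _).mp hd.1.1, (pv_dayset_mem _ _ _).mp hd.1.2,
      (pv_dayset_mem _ _ _).mp hd.2⟩
  · rintro ⟨d, hd0, h1, h2, h3⟩
    refine ⟨d, ?_, ?_⟩
    · rw [PySem.List.mem_pyRange_one]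
      obtain ⟨s, _, hs⟩ := h3
      have := pvSlotDay_value_range day_slots s (d + 2) hs
      omega
    · simp only [Bool.and_eq_true, hc]
      exact ⟨⟨(pv_dayset_mem _ _ _).mpr h1, (pv_dayset_mem _ _ _).mpr h2⟩,
        (pv_dayset_mem _ _ _).mpr h3⟩

-- bit i of B's fold = some non-removed slot of the list maps to day i
theorem pv_mask_testBit (std : PySem.Dict Int Int) (slots : List Int) (removed : Int)
    (m : Nat) (i : Nat) :
    (slots.foldl (fun m s =>
      if s ≠ removed then
        match std.get? s with
        | some d => m ||| (1 <<< d.toNat)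
        | none => m
      else m) m).testBit i = true ↔
      m.testBit i = true ∨
        ∃ s ∈ slots, s ≠ removed ∧ ∃ d : Int, std.get? s = some d ∧ d.toNat = i := by
  induction slots generalizing m with
  | nil => simp
  | cons x t ih =>
    simp only [List.foldl_cons, List.mem_cons]
    rw [ih]
    constructor
    · rintro (hm | hrest)
      · by_cases hx : x ≠ removed
        · simp only [if_pos hx] at hm
          cases hstd : std.get? x with
          | none => rw [hstd] at hm; exact Or.inl hm
          | some d =>
            rw [hstd] at hm
            rw [Nat.testBit_or] at hm
            rcases Bool.or_eq_true_iff.mp hm with h | h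
            · exact Or.inl h
            · rw [Nat.shiftLeft_eq, one_mul, Nat.testBit_two_pow] at h
              exact Or.inr ⟨x, Or.inl rfl, hx, d, hstd, of_decide_eq_true h⟩
        · simp only [if_neg hx] at hm; exact Or.inl hm
      · obtain ⟨s, hs, hsr, d, hd, hdi⟩ := hrest
        exact Or.inr ⟨s, Or.inr hs, hsr, d, hd, hdi⟩
    · rintro (hm | ⟨s, hsmem, hsr, d, hd, hdi⟩)
      · left
        by_cases hx : x ≠ removed
        · simp only [if_pos hx]
          cases hstd : std.get? x with
          | none => exact hm
          | some d => rw [Nat.testBit_or, hm]; rfl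
        · simpa [if_neg hx] using hm
      · rcases hsmem with rfl | hsmem
        · left
          simp only [if_pos hsr, hd]
          rw [Nat.testBit_or, Nat.shiftLeft_eq, one_mul, Nat.testBit_two_pow]
          simp [hdi]
        · exact Or.inr ⟨s, hsmem, hsr, d, hd, hdi⟩

-- the bit-parallel test finds exactly the 3-in-a-row patterns
theorem pv_and_shifts_ne_zero (mask : Nat) :
    mask &&& (mask >>> 1) &&& (mask >>> 2) ≠ 0 ↔
      ∃ i : Nat, mask.testBit i = true ∧ mask.testBit (i + 1) = true ∧
        mask.testBit (i + 2) = true := by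
  constructor
  · intro h
    rcases Nat.exists_testBit_of_ne_zero h with ⟨i, hi⟩
    rw [Nat.testBit_and, Nat.testBit_and, Nat.testBit_shiftRight, Nat.testBit_shiftRight] at hi
    simp only [Bool.and_eq_true] at hi
    exact ⟨i, hi.1.1, by simpa [Nat.add_comm] using hi.1.2, by simpa [Nat.add_comm] using hi.2⟩
  · rintro ⟨i, h0, h1, h2⟩
    intro hz
    have : (mask &&& (mask >>> 1) &&& (mask >>> 2)).testBit i = true := by
      rw [Nat.testBit_and, Nat.testBit_and, Nat.testBit_shiftRight, Nat.testBit_shiftRight]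
      simp [h0, Nat.add_comm 1 i ▸ h1, Nat.add_comm 2 i ▸ h2]
    rw [hz] at this
    simp at this
  
-- membership in A's modified set = B's filter-plus-added condition
theorem pv_modified_mem (L : List Int) (removed added s : Int) :
    (s ∈ PySem.Set.add
        (if (PySem.Set.ofList L).contains removed then
          PySem.Set.discard (PySem.Set.ofList L) removed
        else PySem.Set.ofList L) added) ↔
      (s ∈ L ∧ s ≠ removed) ∨ s = added := by
  rw [PySem.Set.mem_add]
  by_cases h : removed ∈ (PySem.Set.ofList L : List Int)
  · rw [if_pos (by simpa using h), PySem.Set.mem_discard, PySem.Set.mem_ofList]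
  · have hcon : (PySem.Set.ofList L).contains removed = false := by
      cases hc : (PySem.Set.ofList L).contains removed
      · rfl
      · exact absurd (by simpa using hc) h
    rw [hcon, if_neg (by simp), PySem.Set.mem_ofList]
    rw [PySem.Set.mem_ofList] at h
    constructor
    · rintro (hs | rfl)
      · exact Or.inl ⟨hs, fun hr => h (hr ▸ hs)⟩
      · exact Or.inr rfl
    · rintro (⟨hs, _⟩ | rfl)
      · exact Or.inl hs
      · exact Or.inr rfl

-- the per-student agreement: A's triple scan = B's bitmask test
theorem pv_student_eq (day_slots : List Int) (L : List Int) (removed added : Int) :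
    decide ((pvTriples
        (PySem.Set.add
          (if (PySem.Set.ofList L).contains removed then
            PySem.Set.discard (PySem.Set.ofList L) removed
          else PySem.Set.ofList L) added)
        (pvSlotDayMapAlt day_slots) (day_slots.length)).length > 0) =
      pvThreeInARow (pvSlotDayMapAlt day_slots) L removed added := by
  set std := pvSlotDayMapAlt day_slots with hstd
  unfold pvThreeInARow
  rw [decide_eq_decide]
  rw [pvTriples_pos_iff]
  -- characterise B's full mask bits (fold + possible 'added' bit)
  have maskbit : ∀ i : Nat,
      ((match std.get? added with
        | some d => (L.foldl (fun m s =>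
            if s ≠ removed then
              match std.get? s with
              | some d => m ||| (1 <<< d.toNat)
              | none => m
            else m) 0) ||| (1 <<< d.toNat)
        | none => (L.foldl (fun m s =>
            if s ≠ removed then
              match std.get? s with
              | some d => m ||| (1 <<< d.toNat)
              | none => m
            else m) 0)).testBit i = true) ↔
      ∃ s, ((s ∈ L ∧ s ≠ removed) ∨ s = added) ∧ ∃ d : Int, std.get? s = some d ∧ d.toNat = i := by
    intro i
    cases hadd : std.get? added with
    | none =>
      rw [pv_mask_testBit]
      simp only [Nat.zero_testBit, Bool.false_eq_true, false_or]
      constructor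
      · rintro ⟨s, hs, hsr, d, hd, hdi⟩; exact ⟨s, Or.inl ⟨hs, hsr⟩, d, hd, hdi⟩
      · rintro ⟨s, (⟨hs, hsr⟩ | rfl), d, hd, hdi⟩
        · exact ⟨s, hs, hsr, d, hd, hdi⟩
        · rw [hadd] at hd; cases hd
    | some dA =>
      rw [Nat.testBit_or, Bool.or_eq_true_iff, pv_mask_testBit]
      simp only [Nat.zero_testBit, Bool.false_eq_true, false_or]
      rw [Nat.shiftLeft_eq, one_mul, Nat.testBit_two_pow, decide_eq_true_iff]
      constructor
      · rintro (⟨s, hs, hsr, d, hd, hdi⟩ | hdi)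
        · exact ⟨s, Or.inl ⟨hs, hsr⟩, d, hd, hdi⟩
        · exact ⟨added, Or.inr rfl, dA, hadd, hdi⟩
      · rintro ⟨s, (⟨hs, hsr⟩ | rfl), d, hd, hdi⟩
        · exact Or.inl ⟨s, hs, hsr, d, hd, hdi⟩
        · rw [hadd] at hd; cases hd; exact Or.inr hdi
  rw [pv_and_shifts_ne_zero]
  constructor
  · rintro ⟨d, hd0, h1, h2, h3⟩
    refine ⟨d.toNat, ?_, ?_, ?_⟩
    · rw [maskbit]
      obtain ⟨s, hs, hsd⟩ := h1
      exact ⟨s, (pv_modified_mem L removed added s).mp hs, d, hsd, rfl⟩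
    · rw [maskbit]
      obtain ⟨s, hs, hsd⟩ := h2
      exact ⟨s, (pv_modified_mem L removed added s).mp hs, d + 1, hsd, by omega⟩
    · rw [maskbit]
      obtain ⟨s, hs, hsd⟩ := h3
      exact ⟨s, (pv_modified_mem L removed added s).mp hs, d + 2, hsd, by omega⟩
  · rintro ⟨i, h0, h1, h2⟩
    rw [maskbit] at h0 h1 h2
    obtain ⟨s0, hs0, d0, hd0, hdi0⟩ := h0
    obtain ⟨s1, hs1, d1, hd1, hdi1⟩ := h1
    obtain ⟨s2, hs2, d2, hd2, hdi2⟩ := h2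
    have r0 := pvSlotDay_value_range day_slots s0 d0 hd0
    have r1 := pvSlotDay_value_range day_slots s1 d1 hd1
    have r2 := pvSlotDay_value_range day_slots s2 d2 hd2
    refine ⟨(i : Int), by omega, ?_, ?_, ?_⟩
    · exact ⟨s0, (pv_modified_mem L removed added s0).mpr hs0, by rw [hd0]; congr 1; omega⟩
    · exact ⟨s1, (pv_modified_mem L removed added s1).mpr hs1, by rw [hd1]; congr 1; omega⟩
    · exact ⟨s2, (pv_modified_mem L removed added s2).mpr hs2, by rw [hd2]; congr 1; omega⟩

-- ===== VERDICT (by name: the statement is the Claim_ definition above) =====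
theorem swap_would_be_valid_py_spec : Claim_equal_swap_would_be_valid_py := by
  intro courseA slotA courseB slotB course_slot_map conflict_map course_to_students
    student_slots day_slots _
  unfold Spec_swap_would_be_valid_py swap_would_be_valid_py swap_would_be_valid_py_alt
  simp only []
  have hstd : (pvBuildSlotDayMaps day_slots).1 = pvSlotDayMapAlt day_slots := rfl
  rw [hstd]
  set c1 := pvClashes course_slot_map ((PySem.Dict.mk conflict_map).getD courseA []) slotB
    with hc1
  set c2 := pvClashes course_slot_map ((PySem.Dict.mk conflict_map).getD courseB []) slotA
    with hc2
  unfold pvClashes at hc1 hc2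
  rw [← hc1, ← hc2]
  have hsA : (((PySem.Dict.mk course_to_students).getD courseA []).any (fun stu =>
      let sset := PySem.Set.ofList ((PySem.Dict.mk student_slots).getD stu [])
      let sset := if sset.contains slotA then PySem.Set.discard sset slotA else sset
      let sset := PySem.Set.add sset slotB
      decide ((pvTriples sset (pvSlotDayMapAlt day_slots) (day_slots.length)).length > 0))) =
      (((PySem.Dict.mk course_to_students).getD courseA []).any (fun stu =>
      pvThreeInARow (pvSlotDayMapAlt day_slots) ((PySem.Dict.mk student_slots).getD stu [])
        slotA slotB)) := by
    refine PySem.List.any_congr_mem ?_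
    intro stu _
    exact pv_student_eq day_slots ((PySem.Dict.mk student_slots).getD stu []) slotA slotB
  have hsB : (((PySem.Dict.mk course_to_students).getD courseB []).any (fun stu =>
      let sset := PySem.Set.ofList ((PySem.Dict.mk student_slots).getD stu [])
      let sset := if sset.contains slotB then PySem.Set.discard sset slotB else sset
      let sset := PySem.Set.add sset slotA
      decide ((pvTriples sset (pvSlotDayMapAlt day_slots) (day_slots.length)).length > 0))) =
      (((PySem.Dict.mk course_to_students).getD courseB []).any (fun stu =>
      pvThreeInARow (pvSlotDayMapAlt day_slots) ((PySem.Dict.mk student_slots).getD stu [])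
        slotB slotA)) := by
    refine PySem.List.any_congr_mem ?_
    intro stu _
    exact pv_student_eq day_slots ((PySem.Dict.mk student_slots).getD stu []) slotB slotA
  rw [hsA, hsB]
  cases c1 <;> cases c2 <;>
    cases (((PySem.Dict.mk course_to_students).getD courseA []).any (fun stu =>
      pvThreeInARow (pvSlotDayMapAlt day_slots) ((PySem.Dict.mk student_slots).getD stu [])
        slotA slotB)) <;>
    cases (((PySem.Dict.mk course_to_students).getD courseB []).any (fun stu =>
      pvThreeInARow (pvSlotDayMapAlt day_slots) ((PySem.Dict.mk student_slots).getD stu [])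
        slotB slotA)) <;> rfl
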